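-- pv_equiv track=rewrite | github.com/graphql-python/graphql-core | src/graphql/language/block_string.py | dedent_block_string_value
-- ===== SOURCE A (Python) =====
-- def dedent_block_string_value(raw_string: str) -> str:
--     """Produce the value of a block string from its parsed raw value.
--
--     Similar to CoffeeScript's block string, Python's docstring trim or Ruby's
--     strip_heredoc.
--
--     This implements the GraphQL spec's BlockStringValue() static algorithm.
--
--     Note that this is very similar to Python's inspect.cleandoc() function.
--     The differences is that the latter also expands tabs to spaces and
--     removes whitespace at the beginning of the first line. Python also has
--     textwrap.dedent() which uses a completely different algorithm.
--
--     For internal use only.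
--     """
--     # Expand a block string's raw value into independent lines.
--     lines = raw_string.splitlines()
--
--     # Remove common indentation from all lines but first.
--     common_indent = get_block_string_indentation(raw_string)
--
--     if common_indent:
--         lines[1:] = [line[common_indent:] for line in lines[1:]]
--
--     # Remove leading and trailing blank lines.
--     start_line = 0
--     end_line = len(lines)
--     while start_line < end_line and is_blank(lines[start_line]):
--         start_line += 1
--     while end_line > start_line and is_blank(lines[end_line - 1]):
--         end_line -= 1
--
--     # Return a string of the lines joined with U+000A.
--     return "\n".join(lines[start_line:end_line])
--
-- def is_blank(s: str) -> bool:
--     """Check whether string contains only space or tab characters."""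
--     return all(c == " " or c == "\t" for c in s)
--
-- def get_block_string_indentation(value: str) -> int:
--     """Get the amount of indentation for the given block string.
--
--     For internal use only.
--     """
--     is_first_line = is_empty_line = True
--     indent = 0
--     common_indent = None
--
--     for c in value:
--         if c in "\r\n":
--             is_first_line = False
--             is_empty_line = True
--             indent = 0
--         elif c in "\t ":
--             indent += 1
--         else:
--             if (
--                 is_empty_line
--                 and not is_first_line
--                 and (common_indent is None or indent < common_indent)
--             ):
--                 common_indent = indent
--             is_empty_line = False
--
--     return common_indent or 0
-- ===== SOURCE B (Python) =====
-- def _indent(line):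
--     """Number of leading space/tab characters."""
--     i = 0
--     while i < len(line) and line[i] in " \t":
--         i += 1
--     return i
--
--
-- def dedent_block_string_value(raw_string: str) -> str:
--     lines = raw_string.splitlines()
--
--     # Common indentation = minimum leading whitespace over the non-blank
--     # lines after the first (0 if there are none).
--     indents = [_indent(line) for line in lines[1:] if _indent(line) < len(line)]
--     common = min(indents, default=0)
--
--     dedented = lines[:1] + [line[common:] for line in lines[1:]]
--
--     # Remove leading and trailing blank lines by popping from both ends.
--     while dedented and _indent(dedented[0]) == len(dedented[0]):
--         dedented.pop(0)
--     while dedented and _indent(dedented[-1]) == len(dedented[-1]):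
--         dedented.pop()
--
--     return "\n".join(dedented)
-- ===== Notes on version B (the rewrite author's own statement) =====
-- stated objective: faster
-- what changed: Common indentation is computed line-wise (min of leading-whitespace lengths over the non-blank lines after the first) instead of A's character-by-character state machine over the raw string, and leading/trailing blank lines are removed by popping from both ends of the list instead of A's index-based while loops plus slice.
import Mathlib
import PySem

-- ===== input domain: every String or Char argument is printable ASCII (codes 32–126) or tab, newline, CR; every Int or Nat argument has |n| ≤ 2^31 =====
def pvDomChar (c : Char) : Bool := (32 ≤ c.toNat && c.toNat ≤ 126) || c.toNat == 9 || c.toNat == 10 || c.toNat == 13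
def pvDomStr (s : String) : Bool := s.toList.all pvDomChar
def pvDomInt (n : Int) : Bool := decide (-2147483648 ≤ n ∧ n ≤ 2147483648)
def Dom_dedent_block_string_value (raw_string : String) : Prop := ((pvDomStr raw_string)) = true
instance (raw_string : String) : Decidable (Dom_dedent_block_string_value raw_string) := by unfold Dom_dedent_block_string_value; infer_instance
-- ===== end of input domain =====

-- B recomputes the common indentation line-wise (min over the non-blank lines after the
-- first) instead of A's char-by-char state machine, and trims blank lines by popping from
-- both ends; equal return value on the whole printable-ASCII(+tab/NL/CR) domain, and the
-- timing run measured B faster (the per-character Python-level loop disappears).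

-- ===== PORT A =====

-- is_blank: all(c == " " or c == "\t" for c in s)
def pvIsBlank (s : String) : Bool := s.toList.all (fun c => c == ' ' || c == '\t')

-- one step of the for-loop of get_block_string_indentation;
-- state = (is_first_line, is_empty_line, indent, common_indent)
-- ('c in "\r\n"' / 'c in "\t "' on a single char is exactly the two-way equality test
def pvIndentStep (st : Bool × Bool × Int × Option Int) (c : Char) : Bool × Bool × Int × Option Int :=
  match st with
  | (isF, isE, ind, com) =>
    if c == '\r' || c == '\n' then (false, true, 0, com)
    else if c == '\t' || c == ' ' then (isF, isE, ind + 1, com)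
    else
      (isF, false, ind,
        if isE && !isF && (match com with | none => true | some m => decide (ind < m))
        then some ind else com)

def get_block_string_indentation (value : String) : Int :=
  -- `return common_indent or 0` (None → 0; 0 → 0)
  match (value.toList.foldl pvIndentStep (true, true, 0, none)).2.2.2 with
  | none => 0
  | some m => m

-- while start_line < end_line and is_blank(lines[start_line]): start_line += 1
-- (lines[start_line] is always in range while the guard holds, so getD is exact)
def pvStartLoop (lines : List String) (endL : Nat) (s : Nat) : Nat :=
  if s < endL ∧ pvIsBlank (lines.getD s "") then pvStartLoop lines endL (s + 1) else s
termination_by endL - s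
decreasing_by omega

-- while end_line > start_line and is_blank(lines[end_line - 1]): end_line -= 1
def pvEndLoop (lines : List String) (s : Nat) (e : Nat) : Nat :=
  if s < e ∧ pvIsBlank (lines.getD (e - 1) "") then pvEndLoop lines s (e - 1) else e
termination_by e

def dedent_block_string_value (raw_string : String) : String :=
  let lines := PySem.Str.splitlines raw_string
  let common_indent := get_block_string_indentation raw_string
  -- if common_indent: lines[1:] = [line[common_indent:] for line in lines[1:]]
  let lines :=
    if common_indent ≠ 0 then
      match lines with
      | [] => []
      | h :: t => h :: t.map (fun line => PySem.Str.slice line (some common_indent) none)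
    else lines
  let start_line := pvStartLoop lines lines.length 0
  let end_line := pvEndLoop lines start_line lines.length
  PySem.Str.join "\n" (PySem.List.slice lines (some (start_line : Int)) (some (end_line : Int)))

-- ===== PORT B =====

-- _indent: while i < len(line) and line[i] in " \t": i += 1
def pvIndentB : List Char → Nat
  | [] => 0
  | c :: rest => if c == ' ' || c == '\t' then pvIndentB rest + 1 else 0

def pvBIndent (line : String) : Nat := pvIndentB line.toList

def pvBBlank (line : String) : Bool := (pvBIndent line : Int) == PySem.Str.len line

-- while dedented and blank(dedented[0]): dedented.pop(0)
def pvTrimFront : List String → List String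
  | [] => []
  | h :: t => if pvBBlank h then pvTrimFront t else h :: t

-- while dedented and blank(dedented[-1]): dedented.pop()  — run on the reversed list
def pvTrimBack (ls : List String) : List String := (pvTrimFront ls.reverse).reverse

def dedent_block_string_value_alt (raw_string : String) : String :=
  let lines := PySem.Str.splitlines raw_string
  let indents := (lines.tail.filter
      (fun l => pvBIndent l < (PySem.Str.len l).toNat)).map (fun l => (pvBIndent l : Int))
  let common : Int := match indents with | [] => 0 | h :: t => t.foldl min h
  let dedented := lines.take 1 ++ lines.tail.map (fun l => PySem.Str.slice l (some common) none)
  PySem.Str.join "\n" (pvTrimBack (pvTrimFront dedented))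

-- ===== PRECONDITION & SPEC =====
def Spec_dedent_block_string_value (raw_string : String) (out : String) : Prop := out = dedent_block_string_value_alt raw_string
instance (raw_string : String) (out : String) : Decidable (Spec_dedent_block_string_value raw_string out) := by unfold Spec_dedent_block_string_value; infer_instance

-- ===== CLAIM (what is proved, stated in full; the proofs are below) =====
def Claim_equal_dedent_block_string_value : Prop := ∀ (raw_string : String), Dom_dedent_block_string_value raw_string → Spec_dedent_block_string_value raw_string (dedent_block_string_value raw_string)

-- ===== LEMMAS AND PROOFS =====

-- characters that break a line for A's scan (and for splitlines on the domain)
def pvBr (c : Char) : Bool := c == '\r' || c == '\n'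

-- spec-level splitter: splits on \r\n, \r, \n, keeping a (possibly empty) final line
def pvMsl : List Char → List (List Char)
  | [] => [[]]
  | '\r' :: '\n' :: rest => [] :: pvMsl rest
  | c :: rest =>
    if pvBr c then [] :: pvMsl rest
    else match pvMsl rest with
      | [] => [[c]]
      | l :: ls => (c :: l) :: ls

-- drop a trailing empty line (how splitlines finishes)
def pvFin (ls : List (List Char)) : List (List Char) :=
  match ls.getLast? with
  | some [] => ls.dropLast
  | _ => ls

def pvConsPre (p : List Char) : List (List Char) → List (List Char)
  | [] => [p]
  | l :: ls => (p ++ l) :: ls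

-- running minimum of indents over non-blank lines (A's common_indent as a value)
def pvMerge (c : Option Int) (k : Nat) : Option Int :=
  match c with
  | none => some (k : Int)
  | some m => if (k : Int) < m then some (k : Int) else some m

def pvMmin (c : Option Int) : List (List Char) → Option Int
  | [] => c
  | l :: ls => pvMmin (if pvIndentB l < l.length then pvMerge c (pvIndentB l) else c) ls

def pvPrefixWS (n : Nat) : List (List Char) → List (List Char)
  | [] => [List.replicate n ' ']
  | l :: ls => (List.replicate n ' ' ++ l) :: ls

theorem pvMsl_ne_nil (cs : List Char) : pvMsl cs ≠ [] := by
  induction cs using pvMsl.induct <;> simp_all [pvMsl] <;> split <;> simp_all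

theorem pvFin_cons (x : List Char) (m : List (List Char)) (h : m ≠ []) :
    pvFin (x :: m) = x :: pvFin m := by
  cases m with
  | nil => exact absurd rfl h
  | cons b t =>
    unfold pvFin
    rw [List.getLast?_cons_cons, List.dropLast_cons₂]
    split <;> rfl

theorem pvConsPre_nil (ls : List (List Char)) (h : ls ≠ []) : pvConsPre [] ls = ls := by
  cases ls with
  | nil => exact absurd rfl h
  | cons l t => simp [pvConsPre]

theorem pvGo_eq (isB : Char → Bool) : ∀ (cs cur : List Char) (acc : List (List Char)),
    (∀ c ∈ cs, isB c = pvBr c) →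
    PySem.Chars.splitlines.go isB cs cur acc
      = acc.reverse ++ pvFin (pvConsPre cur.reverse (pvMsl cs)) := by
  intro cs cur acc
  induction cs, cur, acc using PySem.Chars.splitlines.go.induct (isB := isB) with
  | case1 cur acc hcur =>
    intro _
    have hnil : cur.reverse = [] := by simpa using hcur
    simp [PySem.Chars.splitlines.go, hcur, pvMsl, pvConsPre, pvFin, hnil]
  | case2 cur acc hcur =>
    intro _
    have hnil : cur.reverse ≠ [] := by simpa using hcur
    simp [PySem.Chars.splitlines.go, hcur, pvMsl, pvConsPre, pvFin,
      List.getLast?_singleton, hnil]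
  | case3 rest cur acc ih =>
    intro hB
    have hB' : ∀ c ∈ rest, isB c = pvBr c := fun c hc => hB c (by simp [hc])
    rw [show PySem.Chars.splitlines.go isB ('\x0d' :: '\n' :: rest) cur acc
          = PySem.Chars.splitlines.go isB rest [] (cur.reverse :: acc) from rfl,
      ih hB']
    simp only [List.reverse_nil]
    rw [pvConsPre_nil _ (pvMsl_ne_nil rest),
      show pvMsl ('\x0d' :: '\n' :: rest) = [] :: pvMsl rest from rfl,
      show pvConsPre cur.reverse ([] :: pvMsl rest) = cur.reverse :: pvMsl rest by
        simp [pvConsPre],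
      pvFin_cons _ _ (pvMsl_ne_nil rest)]
    simp
  | case4 c rest cur acc hne hisB ih =>
    intro hB
    have hB' : ∀ c ∈ rest, isB c = pvBr c := fun c hc => hB c (by simp [hc])
    have hbr : pvBr c = true := by rw [← hB c (by simp)]; exact hisB
    have hgo : PySem.Chars.splitlines.go isB (c :: rest) cur acc
        = PySem.Chars.splitlines.go isB rest [] (cur.reverse :: acc) := by
      conv_lhs => rw [PySem.Chars.splitlines.go.eq_def]
      split
      · rename_i heq; simp at heq
      · rename_i r1 heq
        injection heq with h1 h2
        exact (hne r1 h1 h2).elim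
      · rename_i c' r' _ heq
        injection heq with h1 h2
        subst h1; subst h2
        simp [hisB]
    rw [hgo, ih hB', pvMsl.eq_3 c rest hne]
    simp only [hbr, if_pos, List.reverse_nil]
    rw [pvConsPre_nil _ (pvMsl_ne_nil rest),
      show pvConsPre cur.reverse ([] :: pvMsl rest) = cur.reverse :: pvMsl rest by
        simp [pvConsPre],
      pvFin_cons _ _ (pvMsl_ne_nil rest)]
    simp
  | case5 c rest cur acc hne hisB ih =>
    intro hB
    have hB' : ∀ c ∈ rest, isB c = pvBr c := fun c hc => hB c (by simp [hc])
    have hbr : pvBr c = false := by rw [← hB c (by simp)]; simpa using hisB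
    have hgo : PySem.Chars.splitlines.go isB (c :: rest) cur acc
        = PySem.Chars.splitlines.go isB rest (c :: cur) acc := by
      conv_lhs => rw [PySem.Chars.splitlines.go.eq_def]
      split
      · rename_i heq; simp at heq
      · rename_i r1 heq
        injection heq with h1 h2
        exact (hne r1 h1 h2).elim
      · rename_i c' r' _ heq
        injection heq with h1 h2
        subst h1; subst h2
        simp [hisB]
    rw [hgo, ih hB', pvMsl.eq_3 c rest hne]
    simp only [hbr, Bool.false_eq_true, if_false]
    obtain ⟨l, ls, hml⟩ : ∃ l ls, pvMsl rest = l :: ls := by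
      cases hm : pvMsl rest with
      | nil => exact absurd hm (pvMsl_ne_nil rest)
      | cons l ls => exact ⟨l, ls, rfl⟩
    rw [hml]
    simp [pvConsPre]

theorem pvSplitlines_eq (cs : List Char) (h : cs.all pvDomChar = true) :
    PySem.Chars.splitlines cs = pvFin (pvMsl cs) := by
  have hB : ∀ c ∈ cs,
      (decide (c.toNat = 10) || decide (c.toNat = 13) || decide (c.toNat = 11) ||
       decide (c.toNat = 12) || decide (c.toNat = 28) || decide (c.toNat = 29) ||
       decide (c.toNat = 30) || decide (c.toNat = 133) || decide (c.toNat = 8232) ||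
       decide (c.toNat = 8233)) = pvBr c := by
    intro c hc
    have hd : pvDomChar c = true := by
      rw [List.all_eq_true] at h; exact h c hc
    have hdom : (32 ≤ c.toNat ∧ c.toNat ≤ 126) ∨ c.toNat = 9 ∨ c.toNat = 10 ∨ c.toNat = 13 := by
      simp [pvDomChar] at hd; omega
    have h13 : (c == '\x0d') = decide (c.toNat = 13) := by
      by_cases hn : c.toNat = 13
      · have hcc : c = '\x0d' := Char.ext (UInt32.toNat_inj.mp hn)
        subst hcc; rfl
      · have hcc : c ≠ '\x0d' := fun hh => hn (by subst hh; rfl)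
        simp [hcc, hn]
    have h10 : (c == '\n') = decide (c.toNat = 10) := by
      by_cases hn : c.toNat = 10
      · have hcc : c = '\n' := Char.ext (UInt32.toNat_inj.mp hn)
        subst hcc; rfl
      · have hcc : c ≠ '\n' := fun hh => hn (by subst hh; rfl)
        simp [hcc, hn]
    simp only [pvBr, h13, h10]
    have hnot : c.toNat ≠ 11 ∧ c.toNat ≠ 12 ∧ c.toNat ≠ 28 ∧ c.toNat ≠ 29 ∧
        c.toNat ≠ 30 ∧ c.toNat ≠ 133 ∧ c.toNat ≠ 8232 ∧ c.toNat ≠ 8233 := by omega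
    obtain ⟨n11, n12, n28, n29, n30, n133, na, nb⟩ := hnot
    simp [n11, n12, n28, n29, n30, n133, na, nb, Bool.or_comm]
  show PySem.Chars.splitlines.go _ cs [] [] = _
  rw [pvGo_eq _ cs [] [] hB]
  simp [pvConsPre_nil _ (pvMsl_ne_nil cs)]

theorem pvIndentB_replicate (n : Nat) (l : List Char) :
    pvIndentB (List.replicate n ' ' ++ l) = n + pvIndentB l := by
  induction n with
  | zero => simp
  | succ k ih => simp only [List.replicate_succ, List.cons_append, pvIndentB, ih]; simp; omega

theorem pvPrefixWS_zero (ls : List (List Char)) (h : ls ≠ []) : pvPrefixWS 0 ls = ls := by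
  cases ls with
  | nil => exact absurd rfl h
  | cons l t => simp [pvPrefixWS]

theorem pvMmin_congr_head (c : Option Int) (u v : List Char) (t : List (List Char))
    (h1 : pvIndentB u = pvIndentB v) (h2 : u.length = v.length) :
    pvMmin c (u :: t) = pvMmin c (v :: t) := by
  simp [pvMmin, h1, h2]

-- the fold of A's indentation scan computes the running min over the lines
theorem pvFoldTriple (cs : List Char) : ∀ (ind : Nat) (c : Option Int),
    ((cs.foldl pvIndentStep (false, true, (ind : Int), c)).2.2.2 = pvMmin c (pvPrefixWS ind (pvMsl cs)))
  ∧ (∀ isF, (cs.foldl pvIndentStep (isF, false, (ind : Int), c)).2.2.2 = pvMmin c ((pvMsl cs).tail))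
  ∧ ((cs.foldl pvIndentStep (true, true, (ind : Int), c)).2.2.2 = pvMmin c ((pvMsl cs).tail)) := by
  induction cs using pvMsl.induct with
  | case1 =>
    intro ind c
    have hval : pvIndentB (List.replicate ind ' ') = ind := by
      simpa using pvIndentB_replicate ind []
    refine ⟨?_, ?_, ?_⟩ <;> simp [pvMsl, pvPrefixWS, pvMmin, hval]
  | case2 rest ih =>
    intro ind c
    have hstep : ∀ st : Bool × Bool × Int × Option Int,
        (('\x0d' :: '\n' :: rest).foldl pvIndentStep st)
          = rest.foldl pvIndentStep (false, true, 0, st.2.2.2) := by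
      intro st; obtain ⟨a, b, d, e⟩ := st; rfl
    have hz : ((0 : Nat) : Int) = (0 : Int) := by simp
    have ha := (ih 0 (c := c)).1
    rw [hz] at ha
    have ha' : (rest.foldl pvIndentStep (false, true, 0, c)).2.2.2
        = pvMmin c (pvMsl rest) := by
      rw [ha, pvPrefixWS_zero _ (pvMsl_ne_nil rest)]
    have hmsl : pvMsl ('\x0d' :: '\n' :: rest) = [] :: pvMsl rest := rfl
    have hblank : pvMmin c (List.replicate ind ' ' :: pvMsl rest) = pvMmin c (pvMsl rest) := by
      have hval : pvIndentB (List.replicate ind ' ') = ind := by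
        simpa using pvIndentB_replicate ind []
      simp [pvMmin, hval]
    refine ⟨?_, ?_, ?_⟩
    · rw [hstep, ha', hmsl]
      symm
      simp only [pvPrefixWS, List.append_nil]
      exact hblank
    · intro isF; rw [hstep, ha', hmsl]; simp
    · rw [hstep, ha', hmsl]; simp
  | case3 c0 rest hne hbr ih =>
    intro ind c
    have hbr' : (c0 == '\x0d' || c0 == '\n') = true := hbr
    have hstep : ∀ st : Bool × Bool × Int × Option Int,
        ((c0 :: rest).foldl pvIndentStep st)
          = rest.foldl pvIndentStep (false, true, 0, st.2.2.2) := by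
      intro st; obtain ⟨a, b, d, e⟩ := st
      simp [List.foldl_cons, pvIndentStep, hbr']
    have hz : ((0 : Nat) : Int) = (0 : Int) := by simp
    have ha := (ih 0 (c := c)).1
    rw [hz] at ha
    have ha' : (rest.foldl pvIndentStep (false, true, 0, c)).2.2.2
        = pvMmin c (pvMsl rest) := by
      rw [ha, pvPrefixWS_zero _ (pvMsl_ne_nil rest)]
    have hmsl : pvMsl (c0 :: rest) = [] :: pvMsl rest := by
      rw [pvMsl.eq_3 c0 rest hne]; simp [hbr]
    have hblank : pvMmin c (List.replicate ind ' ' :: pvMsl rest) = pvMmin c (pvMsl rest) := by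
      have hval : pvIndentB (List.replicate ind ' ') = ind := by
        simpa using pvIndentB_replicate ind []
      simp [pvMmin, hval]
    refine ⟨?_, ?_, ?_⟩
    · rw [hstep, ha', hmsl]
      symm
      simp only [pvPrefixWS, List.append_nil]
      exact hblank
    · intro isF; rw [hstep, ha', hmsl]; simp
    · rw [hstep, ha', hmsl]; simp
  | case4 c0 rest hne hbr hml ih => exact absurd hml (pvMsl_ne_nil rest)
  | case5 c0 rest hne hbr l ls hml ih =>
    intro ind c
    have hbr' : (c0 == '\x0d' || c0 == '\n') = false := by
      simpa [pvBr] using hbr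
    have hmsl : pvMsl (c0 :: rest) = (c0 :: l) :: ls := by
      rw [pvMsl.eq_3 c0 rest hne]; simp [hbr, hml]
    have htail : (pvMsl rest).tail = ls := by rw [hml]; rfl
    by_cases hws : (c0 == '\t' || c0 == ' ') = true
    · -- whitespace character
      have hws' : (c0 == ' ' || c0 == '\t') = true := by
        rcases Bool.or_eq_true_iff.mp hws with h | h <;> simp [h]
      have hstep : ∀ (isF isE : Bool) (com : Option Int) (i : Int),
          ((c0 :: rest).foldl pvIndentStep (isF, isE, i, com))
            = rest.foldl pvIndentStep (isF, isE, i + 1, com) := by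
        intro isF isE com i
        simp [List.foldl_cons, pvIndentStep, hbr', hws]
      have hcast : ((ind : Int) + 1) = ((ind + 1 : Nat) : Int) := by push_cast; ring
      have hindc : pvIndentB (c0 :: l) = pvIndentB l + 1 := by
        simp [pvIndentB, hws']
      refine ⟨?_, ?_, ?_⟩
      · rw [hstep, hcast, (ih (ind + 1) (c := c)).1, hmsl]
        show _ = pvMmin c (pvPrefixWS ind ((c0 :: l) :: ls))
        simp only [pvPrefixWS]
        cases hm2 : pvMsl rest with
        | nil => exact absurd hm2 (pvMsl_ne_nil rest)
        | cons l2 ls2 =>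
          rw [hm2] at hml; injection hml with e1 e2; subst e1; subst e2
          simp only [pvPrefixWS]
          apply pvMmin_congr_head
          · rw [pvIndentB_replicate, pvIndentB_replicate, hindc]; omega
          · simp; omega
      · intro isF; rw [hstep, hcast, (ih (ind + 1) (c := c)).2.1 isF, htail, hmsl]; rfl
      · rw [hstep, hcast, (ih (ind + 1) (c := c)).2.2, htail, hmsl]; rfl
    · -- first non-whitespace character of the line
      have hwsf : (c0 == '\t' || c0 == ' ') = false := eq_false_of_ne_true hws
      have hws0 : (c0 == ' ' || c0 == '\t') = false := by
        rw [← hwsf]; exact Bool.or_comm _ _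
      have hindc : pvIndentB (c0 :: l) = 0 := by simp [pvIndentB, hws0]
      have hstep : ∀ (isF isE : Bool) (com : Option Int) (i : Int),
          ((c0 :: rest).foldl pvIndentStep (isF, isE, i, com))
            = rest.foldl pvIndentStep
                (isF, false, i,
                  if isE && !isF && (match com with | none => true | some m => decide (i < m))
                  then some i else com) := by
        intro isF isE com i
        simp only [List.foldl_cons, pvIndentStep, hbr', hwsf, Bool.false_eq_true, if_false]
      refine ⟨?_, ?_, ?_⟩
      · rw [hstep]
        have hcond : (if true && !false &&
              (match c with | none => true | some m => decide ((ind : Int) < m))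
            then some (ind : Int) else c) = pvMerge c ind := by
          cases c <;> simp [pvMerge]
        rw [hcond, (ih ind (c := pvMerge c ind)).2.1 false, htail, hmsl]
        show _ = pvMmin c (pvPrefixWS ind ((c0 :: l) :: ls))
        simp only [pvPrefixWS]
        have hu : pvIndentB (List.replicate ind ' ' ++ c0 :: l) = ind := by
          rw [pvIndentB_replicate, hindc]; omega
        have hlt : pvIndentB (List.replicate ind ' ' ++ c0 :: l)
            < (List.replicate ind ' ' ++ c0 :: l).length := by
          rw [hu]; simp
        simp [pvMmin, hlt, hu]
      · intro isF; rw [hstep]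
        simp only [Bool.false_and, Bool.and_false, Bool.false_eq_true, if_false]
        rw [(ih ind (c := c)).2.1 isF, htail, hmsl]; rfl
      · rw [hstep]
        simp only [Bool.not_true, Bool.and_false, Bool.false_and, Bool.false_eq_true, if_false]
        rw [(ih ind (c := c)).2.1 true, htail, hmsl]; rfl

theorem pvIndentation_eq (s : String) :
    get_block_string_indentation s = (pvMmin none ((pvMsl s.toList).tail)).getD 0 := by
  have h := (pvFoldTriple s.toList 0 none).2.2
  rw [Nat.cast_zero] at h
  unfold get_block_string_indentation
  rw [h]
  cases pvMmin none ((pvMsl s.toList).tail) <;> simp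

theorem pvMmin_dropLast_blank : ∀ (t : List (List Char)) (c : Option Int),
    t.getLast? = some [] → pvMmin c t.dropLast = pvMmin c t := by
  intro t
  induction t with
  | nil => intro c h; simp at h
  | cons a t ih =>
    intro c h
    cases t with
    | nil =>
      simp only [List.getLast?_singleton, Option.some_inj] at h
      subst h
      simp [pvMmin, pvIndentB]
    | cons b r =>
      rw [List.getLast?_cons_cons] at h
      rw [List.dropLast_cons₂]
      simp only [pvMmin]
      exact ih _ h

theorem pvMmin_fin_tail (ls : List (List Char)) (h : ls ≠ []) (c : Option Int) :
    pvMmin c ((pvFin ls).tail) = pvMmin c ls.tail := by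
  unfold pvFin
  split
  · rename_i hlast
    cases ls with
    | nil => exact absurd rfl h
    | cons a t =>
      cases t with
      | nil => rfl
      | cons b r =>
        rw [List.getLast?_cons_cons] at hlast
        rw [List.dropLast_cons₂]
        simp only [List.tail_cons]
        exact pvMmin_dropLast_blank _ c hlast
  · rfl

theorem pvMerge_some (m : Int) (k : Nat) : pvMerge (some m) k = some (min m (k : Int)) := by
  simp only [pvMerge]
  split_ifs with h1 <;> (congr 1; omega)

theorem pvMmin_some (ls : List (List Char)) : ∀ (m : Int),
    pvMmin (some m) ls
      = some (((ls.filter (fun l => pvIndentB l < l.length)).map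
          (fun l => (pvIndentB l : Int))).foldl min m) := by
  induction ls with
  | nil => intro m; simp [pvMmin]
  | cons l t ih =>
    intro m
    by_cases h : pvIndentB l < l.length
    · simp only [pvMmin, h, if_pos, pvMerge_some]
      rw [ih]
      simp [h]
    · simp only [pvMmin, h, if_neg, not_false_iff]
      rw [ih]
      simp [h]

theorem pvMmin_none (ls : List (List Char)) :
    (pvMmin none ls).getD 0
      = (match (ls.filter (fun l => pvIndentB l < l.length)).map
            (fun l => (pvIndentB l : Int)) with
         | [] => (0 : Int)
         | h :: t => t.foldl min h) := by
  induction ls with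
  | nil => simp [pvMmin]
  | cons l t ih =>
    by_cases h : pvIndentB l < l.length
    · simp only [pvMmin, h, if_pos]
      show (pvMmin (pvMerge none (pvIndentB l)) t).getD 0 = _
      simp only [pvMerge, pvMmin_some]
      simp [h]
    · simp only [pvMmin, h, if_neg, not_false_iff]
      rw [ih]
      simp [h]

-- ===== trimming =====

theorem pvAll_ws_iff : ∀ l : List Char,
    (l.all (fun c => c == ' ' || c == '\t') = true) ↔ pvIndentB l = l.length := by
  intro l
  induction l with
  | nil => simp [pvIndentB]
  | cons c t ih =>
    by_cases hc : (c == ' ' || c == '\t') = true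
    · simp only [List.all_cons, hc, Bool.true_and, pvIndentB, if_pos, List.length_cons, ih]
      omega
    · simp only [List.all_cons, eq_false_of_ne_true hc, Bool.false_and, pvIndentB,
        if_neg hc, List.length_cons]
      simp

theorem pvIsBlank_eq_pvBBlank : pvIsBlank = pvBBlank := by
  funext s
  unfold pvIsBlank pvBBlank pvBIndent
  rw [PySem.Str.len_eq]
  by_cases h : s.toList.all (fun c => c == ' ' || c == '\t') = true
  · have he := (pvAll_ws_iff s.toList).mp h
    simp [h, he]
  · have hne := fun he => h ((pvAll_ws_iff s.toList).mpr he)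
    simp only [eq_false_of_ne_true h]
    symm
    simp only [beq_eq_false_iff_ne, ne_eq]
    intro hcast
    exact hne (by exact_mod_cast hcast)

theorem pvTrimFront_eq (ls : List String) : pvTrimFront ls = ls.dropWhile pvBBlank := by
  induction ls with
  | nil => rfl
  | cons h t ih => simp [pvTrimFront, List.dropWhile, ih]; split <;> simp_all

theorem pvStartLoop_eq (L : List String) : ∀ s, s ≤ L.length →
    pvStartLoop L L.length s = s + ((L.drop s).takeWhile pvIsBlank).length := by
  intro s
  induction s using pvStartLoop.induct (lines := L) (endL := L.length) with
  | case1 x hcond ih =>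
    intro _
    obtain ⟨hlt, hbl⟩ := hcond
    rw [pvStartLoop, if_pos ⟨hlt, hbl⟩, ih (by omega)]
    rw [List.getD_eq_getElem L "" hlt] at hbl
    rw [← List.getElem_cons_drop hlt, List.takeWhile_cons_of_pos hbl]
    simp
    omega
  | case2 x hcond =>
    intro hle
    rw [pvStartLoop, if_neg hcond]
    by_cases hlt : x < L.length
    · have hbl : ¬ pvIsBlank (L.getD x "") = true := fun h => hcond ⟨hlt, h⟩
      rw [List.getD_eq_getElem L "" hlt] at hbl
      rw [← List.getElem_cons_drop hlt, List.takeWhile_cons_of_neg hbl]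
      simp
    · have hx : x = L.length := by omega
      subst hx
      rw [List.drop_length]
      simp

theorem pvEndLoop_eq (L : List String) (s : Nat) : ∀ e, s ≤ e → e ≤ L.length →
    pvEndLoop L s e = max s (e - ((L.take e).reverse.takeWhile pvIsBlank).length) := by
  intro e
  induction e using pvEndLoop.induct (lines := L) (s := s) with
  | case1 e hcond ih =>
    intro hse hlen
    obtain ⟨hlt, hbl⟩ := hcond
    have hm1 : e - 1 < L.length := by omega
    rw [pvEndLoop, if_pos ⟨hlt, hbl⟩, ih (by omega) (by omega)]
    rw [List.getD_eq_getElem L "" hm1] at hbl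
    have htake : L.take e = L.take (e - 1) ++ [L[e - 1]] := by
      conv_lhs => rw [show e = (e - 1) + 1 by omega]
      rw [List.take_add_one, List.getElem?_eq_getElem hm1]
      simp
    rw [htake]
    rw [List.reverse_append]
    simp only [List.reverse_cons, List.reverse_nil, List.nil_append, List.singleton_append]
    rw [List.takeWhile_cons_of_pos hbl]
    simp
    omega
  | case2 e hcond =>
    intro hse hlen
    rw [pvEndLoop, if_neg hcond]
    by_cases hlt : s < e
    · have hm1 : e - 1 < L.length := by omega
      have hbl : ¬ pvIsBlank (L.getD (e - 1) "") = true := fun h => hcond ⟨hlt, h⟩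
      rw [List.getD_eq_getElem L "" hm1] at hbl
      have htake : L.take e = L.take (e - 1) ++ [L[e - 1]] := by
        conv_lhs => rw [show e = (e - 1) + 1 by omega]
        rw [List.take_add_one, List.getElem?_eq_getElem hm1]
        simp
      rw [htake, List.reverse_append]
      simp only [List.reverse_cons, List.reverse_nil, List.nil_append, List.singleton_append]
      rw [List.takeWhile_cons_of_neg hbl]
      simp
      omega
    · have hx : s = e := by omega
      omega

theorem pvDropWhile_eq_drop {α : Type} (p : α → Bool) (l : List α) :
    l.dropWhile p = l.drop (l.takeWhile p).length := by
  induction l with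
  | nil => rfl
  | cons a t ih =>
    by_cases h : p a = true
    · rw [List.dropWhile_cons_of_pos h, List.takeWhile_cons_of_pos h, ih]
      simp
    · rw [List.dropWhile_cons_of_neg h, List.takeWhile_cons_of_neg h]
      simp

theorem pvTakeWhile_le {α : Type} (p : α → Bool) : ∀ (l : List α), (l.takeWhile p).length ≤ l.length := by
  intro l
  induction l with
  | nil => simp
  | cons a t ih =>
    by_cases h : p a = true
    · rw [List.takeWhile_cons_of_pos h]; simp; omega
    · rw [List.takeWhile_cons_of_neg h]; simp

theorem pvTakeWhile_stop {α : Type} (p : α → Bool) :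
    ∀ (l : List α) (h : (l.takeWhile p).length < l.length),
      p (l[(l.takeWhile p).length]'h) = false := by
  intro l
  induction l with
  | nil => intro h; simp at h
  | cons a t ih =>
    intro h
    by_cases hp : p a = true
    · have hh : ((a :: t).takeWhile p).length = (t.takeWhile p).length + 1 := by
        rw [List.takeWhile_cons_of_pos hp]; simp
      have ht : (t.takeWhile p).length < t.length := by
        simp only [hh, List.length_cons] at h; omega
      have := ih ht
      simp only [hh]
      simpa using this
    · have hh : ((a :: t).takeWhile p).length = 0 := by
        rw [List.takeWhile_cons_of_neg hp]; simp
      simp only [hh]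
      simpa using eq_false_of_ne_true hp

theorem pvTakeWhile_le_of_not {α : Type} (p : α → Bool) :
    ∀ (l : List α) (i : Nat) (hi : i < l.length), p (l[i]'hi) = false →
      (l.takeWhile p).length ≤ i := by
  intro l
  induction l with
  | nil => intro i hi; simp at hi
  | cons a t ih =>
    intro i hi hp
    by_cases hpa : p a = true
    · cases i with
      | zero => simp at hp; rw [hp] at hpa; exact absurd hpa (by simp)
      | succ j =>
        rw [List.takeWhile_cons_of_pos hpa]
        have := ih j (by simpa using hi) (by simpa using hp)
        simp
        omega
    · rw [List.takeWhile_cons_of_neg hpa]; simp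

theorem pvTakeWhile_take {α : Type} (p : α → Bool) :
    ∀ (l : List α) (m : Nat), (l.takeWhile p).length < m →
      (l.take m).takeWhile p = l.takeWhile p := by
  intro l
  induction l with
  | nil => intro m _; simp
  | cons a t ih =>
    intro m hm
    cases m with
    | zero => simp at hm
    | succ k =>
      by_cases hp : p a = true
      · rw [List.take_succ_cons, List.takeWhile_cons_of_pos hp, List.takeWhile_cons_of_pos hp,
          ih k (by rw [List.takeWhile_cons_of_pos hp] at hm; simp at hm; omega)]
      · rw [List.take_succ_cons, List.takeWhile_cons_of_neg hp, List.takeWhile_cons_of_neg hp]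

theorem pvRevDropRev {α : Type} (xs : List α) (j : Nat) :
    (xs.reverse.drop j).reverse = xs.take (xs.length - j) := by
  rw [List.reverse_drop]
  simp

theorem pvTrim_eq (L : List String) :
    (L.drop (pvStartLoop L L.length 0)).take
        (pvEndLoop L (pvStartLoop L L.length 0) L.length - pvStartLoop L L.length 0)
      = pvTrimBack (pvTrimFront L) := by
  have hTF : ∀ X : List String, pvTrimFront X = X.dropWhile pvIsBlank := by
    intro X; rw [pvTrimFront_eq, pvIsBlank_eq_pvBBlank]
  have hs : pvStartLoop L L.length 0 = ((L.takeWhile pvIsBlank).length) := by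
    rw [pvStartLoop_eq L 0 (by omega)]
    simp
  set k := (L.takeWhile pvIsBlank).length with hk
  set n := L.length with hn
  have hkn : k ≤ n := pvTakeWhile_le _ _
  have he : pvEndLoop L k n = max k (n - ((L.reverse.takeWhile pvIsBlank).length)) := by
    rw [pvEndLoop_eq L k n hkn (by omega)]
    rw [hn, List.take_length]
  set j := (L.reverse.takeWhile pvIsBlank).length with hj
  rw [hs, he]
  unfold pvTrimBack
  rw [hTF, hTF, pvDropWhile_eq_drop pvIsBlank L, ← hk]
  by_cases hklt : k < n
  · have hstop : pvIsBlank (L[k]'hklt) = false := pvTakeWhile_stop pvIsBlank L hklt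
    have hrev : L.reverse[n - 1 - k]'(by simp [← hn]; omega) = L[k]'hklt := by
      rw [List.getElem_reverse]
      congr 1
      simp [← hn]
      omega
    have hjle : j ≤ n - 1 - k := by
      apply pvTakeWhile_le_of_not pvIsBlank L.reverse (n - 1 - k) (by simp [← hn]; omega)
      rw [hrev]; exact hstop
    have hrd : (L.drop k).reverse = L.reverse.take (n - k) := by
      rw [List.reverse_drop, ← hn]
    have hj2 : ((L.drop k).reverse.takeWhile pvIsBlank).length = j := by
      rw [hrd, pvTakeWhile_take pvIsBlank L.reverse (n - k) (by rw [← hj]; omega)]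
    rw [pvDropWhile_eq_drop pvIsBlank (L.drop k).reverse, hj2, pvRevDropRev]
    congr 1
    simp [← hn]
    omega
  · have hke : k = n := by omega
    rw [hke, hn, List.drop_length]
    simp

theorem pvSliceStr_zero (l : String) : PySem.Str.slice l (some 0) none = l := by
  apply String.toList_inj.mp
  rw [PySem.Str.toList_slice, PySem.Chars.slice_eq_listSlice, PySem.List.slice_zero_start,
    PySem.List.slice_none_none]

-- ===== VERDICT (by name: the statement is the Claim_ definition above) =====
theorem dedent_block_string_value_spec : Claim_equal_dedent_block_string_value := by
  unfold Claim_equal_dedent_block_string_value Spec_dedent_block_string_value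
  intro raw hdom
  have hdom' : raw.toList.all pvDomChar = true := hdom
  simp only [dedent_block_string_value, dedent_block_string_value_alt]
  set cs := raw.toList with hcs
  set L0 := PySem.Str.splitlines raw with hL0def
  -- the splitlines characterization
  have hsplit : PySem.Chars.splitlines cs = pvFin (pvMsl cs) := pvSplitlines_eq cs hdom'
  have hLmap : L0.map String.toList = pvFin (pvMsl cs) := by
    rw [hL0def, PySem.Str.splitlines_map_toList]; exact hsplit
  have hL0 : L0 = (pvFin (pvMsl cs)).map String.ofList := by
    have : (L0.map String.toList).map String.ofList = L0 := by
      rw [List.map_map]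
      have : (String.ofList ∘ String.toList) = id := by
        funext t; simp [Function.comp, String.ofList_toList]
      rw [this, List.map_id]
    rw [← this, hLmap]
  -- the common indentation agrees
  have hindents : (L0.tail.filter (fun l => pvBIndent l < (PySem.Str.len l).toNat)).map
        (fun l => (pvBIndent l : Int))
      = ((pvFin (pvMsl cs)).tail.filter (fun u => pvIndentB u < u.length)).map
        (fun u => (pvIndentB u : Int)) := by
    rw [hL0, ← List.map_tail, List.filter_map, List.map_map]
    congr 1
    · funext u
      simp [Function.comp, pvBIndent, String.toList_ofList]
    · apply List.filter_congr
      intro u _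
      simp only [Function.comp, pvBIndent, String.toList_ofList, PySem.Str.len_eq,
        Int.toNat_natCast]
  have hcommon :
      (match (L0.tail.filter (fun l => pvBIndent l < (PySem.Str.len l).toNat)).map
          (fun l => (pvBIndent l : Int)) with
        | [] => (0 : Int)
        | h :: t => t.foldl min h)
      = get_block_string_indentation raw := by
    rw [hindents, ← pvMmin_none, pvMmin_fin_tail _ (pvMsl_ne_nil cs) none, pvIndentation_eq]
  set m := get_block_string_indentation raw with hm
  rw [hcommon]
  -- the dedented line lists agree
  have hded : ∀ ls : List String, (if m ≠ 0 then
        match ls with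
        | [] => ([] : List String)
        | h :: t => h :: t.map (fun line => PySem.Str.slice line (some m) none)
      else ls)
      = ls.take 1 ++ ls.tail.map (fun l => PySem.Str.slice l (some m) none) := by
    intro ls
    by_cases hz : m = 0
    · simp only [hz, ne_eq, not_true_eq_false, if_false]
      have hid : ∀ l : String, PySem.Str.slice l (some (0 : Int)) none = l := pvSliceStr_zero
      cases ls with
      | nil => simp
      | cons h t => simp [hid]
    · simp only [ne_eq, hz, not_false_iff, if_true]
      cases ls with
      | nil => simp
      | cons h t => simp
  rw [hded L0]
  set M := L0.take 1 ++ L0.tail.map (fun l => PySem.Str.slice l (some m) none) with hM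
  -- trimming agrees
  congr 1
  rw [PySem.List.slice_natCast]
  exact pvTrim_eq M
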